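-- pv_equiv track=rewrite | github.com/AlexandrSech/Z49-TMS | students/Titov/course_11.py | foo
-- ===== SOURCE A (Python) =====
-- def foo(spis = []):
--     spis_1 = []
--     spis_2 = []
--     number_names = {
--         0: 'zero', 1: 'one', 2: 'two', 3: 'three', 4: 'four', 5: 'five', 6: 'six', 7: 'seven', 8: 'eight', 9: 'nine',
--         10: 'ten', 11: 'eleven', 12: 'twelve',
--         13: 'thirteen', 14: 'fourteen', 15: 'fifteen', 16: 'sixteen', 17: 'seventeen', 18: 'eighteen', 19: 'nineteen'}
--     for i in spis:
--         spis_2.append(number_names[int(i)])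
--     spis_2 = sorted(spis_2)
--     for el in range(len(spis_2)):
--         for i in number_names:
--             if number_names[i] == spis_2[el]:
--                 spis_1.append(i)
--     return spis_1
-- ===== SOURCE B (Python) =====
-- def foo(spis = []):
--     number_names = {
--         0: 'zero', 1: 'one', 2: 'two', 3: 'three', 4: 'four', 5: 'five', 6: 'six', 7: 'seven', 8: 'eight', 9: 'nine',
--         10: 'ten', 11: 'eleven', 12: 'twelve',
--         13: 'thirteen', 14: 'fourteen', 15: 'fifteen', 16: 'sixteen', 17: 'seventeen', 18: 'eighteen', 19: 'nineteen'}
--     order = sorted(number_names, key=number_names.get)  # 0..19 ordered by English name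
--     counts = {}
--     for i in spis:
--         counts[i] = counts.get(i, 0) + 1
--     out = []
--     for n in order:
--         out.extend([n] * counts.get(n, 0))
--     return out
-- ===== Notes on version B (the rewrite author's own statement) =====
-- stated objective: faster
-- what changed: Replaces A's comparison sort of the English names plus a 20-entry dict scan per output position with a counting sort: one pass builds occurrence counts, then the fixed name-sorted order 0..19 is emitted with each number repeated its count.
import Mathlib
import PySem

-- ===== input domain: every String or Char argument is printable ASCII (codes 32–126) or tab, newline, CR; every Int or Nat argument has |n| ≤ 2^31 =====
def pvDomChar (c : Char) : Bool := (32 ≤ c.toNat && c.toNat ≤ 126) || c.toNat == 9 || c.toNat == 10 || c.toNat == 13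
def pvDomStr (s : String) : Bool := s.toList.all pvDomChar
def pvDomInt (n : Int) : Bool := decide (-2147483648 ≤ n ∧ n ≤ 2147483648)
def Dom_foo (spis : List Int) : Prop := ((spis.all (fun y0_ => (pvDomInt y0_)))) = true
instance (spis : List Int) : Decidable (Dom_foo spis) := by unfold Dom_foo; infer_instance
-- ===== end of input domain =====

-- B replaces A's comparison sort of the names plus a per-position dict scan by a counting sort
-- over the fixed name-sorted order of 0..19 (objective: faster).

-- ===== PORT A =====
-- the number_names dict literal
def fooNames : PySem.Dict Int String :=
  PySem.Dict.ofList [(0, "zero"), (1, "one"), (2, "two"), (3, "three"), (4, "four"), (5, "five"),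
    (6, "six"), (7, "seven"), (8, "eight"), (9, "nine"), (10, "ten"), (11, "eleven"), (12, "twelve"),
    (13, "thirteen"), (14, "fourteen"), (15, "fifteen"), (16, "sixteen"), (17, "seventeen"),
    (18, "eighteen"), (19, "nineteen")]

def foo (spis : List Int) : List Int :=
  -- spis_2.append(number_names[int(i)]); int(i) = i on an int; getD is exact inside Pre_foo (KeyError excluded by Pre_foo)
  let spis2 := spis.foldl (fun acc i => acc ++ [fooNames.getD i ""]) []
  let spis2s := PySem.List.sorted spis2 (fun x => x) false
  -- for el in range(len(spis_2)): for i in number_names: if number_names[i] == spis_2[el]: spis_1.append(i)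
  (PySem.List.pyRange 0 (PySem.List.len spis2s) 1).foldl
    (fun acc el =>
      fooNames.keys.foldl
        (fun acc2 i => if fooNames.getD i "" == PySem.List.pyGetD spis2s el "" then acc2 ++ [i] else acc2)
        acc)
    []

-- ===== PORT B =====
-- order = sorted(number_names, key=number_names.get)  (every key is present, so .get = getD "")
def fooOrder : List Int :=
  PySem.List.sorted fooNames.keys (fun k => fooNames.getD k "") false

def foo_alt (spis : List Int) : List Int :=
  let counts := spis.foldl (fun d i => d.insert i (d.getD i 0 + 1)) ((PySem.Dict.mk []) : PySem.Dict Int Int)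
  fooOrder.foldl (fun out n => out ++ List.replicate (counts.getD n 0).toNat n) []

-- ===== PRECONDITION & SPEC =====
-- Pre_foo excludes exactly the inputs where A raises KeyError: an element outside 0..19.
def Pre_foo (spis : List Int) : Prop := ∀ x ∈ spis, 0 ≤ x ∧ x ≤ 19
instance (spis : List Int) : Decidable (Pre_foo spis) := by unfold Pre_foo; infer_instance
def pvWitness_foo : List Int := [3, 0, 19, 3]

def Spec_foo (spis : List Int) (out : List Int) : Prop := out = foo_alt spis
instance (spis : List Int) (out : List Int) : Decidable (Spec_foo spis out) := by unfold Spec_foo; infer_instance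

-- ===== CLAIM (what is proved, stated in full; the proofs are below) =====
def Claim_equal_foo : Prop := ∀ (spis : List Int), Dom_foo spis → Pre_foo spis → Spec_foo spis (foo spis)

-- ===== LEMMAS AND PROOFS =====

-- the English name of n (proof-side helper)
def fooName (n : Int) : String := fooNames.getD n ""

-- 0..19 in English-name order (proof-side literal for fooOrder)
def fooOrderLit : List Int := [8, 18, 11, 15, 5, 4, 14, 9, 19, 1, 7, 17, 6, 16, 10, 13, 3, 12, 2, 0]

lemma fooOrder_eq : fooOrder = fooOrderLit := by
  apply PySem.List.sorted_eq_of_perm_of_pairwise_lt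
  · decide
  · simp only [String.lt_iff_toList_lt]
    decide

-- A's result, closed form: sorted names, each mapped through the key scan
lemma fooA_eq (spis : List Int) :
    foo spis = (PySem.List.sorted (spis.map fooName) (fun x => x) false).flatMap
      (fun s => fooNames.keys.filter (fun i => fooNames.getD i "" == s)) := by
  unfold foo
  rw [PySem.List.foldl_append_singleton_eq_map, List.nil_append]
  rw [PySem.List.foldl_pyRange_pyGetD _ ""
        (f := fun acc s => fooNames.keys.foldl
          (fun acc2 i => if fooNames.getD i "" == s then acc2 ++ [i] else acc2) acc) [] (le_refl 0)]
  simp only [Int.toNat_zero, List.drop_zero]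
  rw [PySem.List.foldl_congr_mem _
        (fun acc s => fooNames.keys.foldl
          (fun acc2 i => if fooNames.getD i "" == s then acc2 ++ [i] else acc2) acc)
        (fun acc s => acc ++ fooNames.keys.filter (fun i => fooNames.getD i "" == s)) []
        (fun acc s _ => PySem.List.foldl_append_if_eq_filter _ _ acc)]
  rw [PySem.List.foldl_append_eq_flatMap, List.nil_append]
  rfl

-- B's result, closed form
lemma fooB_eq (spis : List Int) :
    foo_alt spis = fooOrderLit.flatMap (fun n => List.replicate (spis.count n) n) := by
  have hc : foo_alt spis
      = fooOrder.foldl (fun out n => out ++ List.replicate ((PySem.Dict.counter spis).getD n 0).toNat n) [] := rfl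
  rw [hc, fooOrder_eq]
  rw [PySem.List.foldl_congr_mem _
        (fun out n => out ++ List.replicate ((PySem.Dict.counter spis).getD n 0).toNat n)
        (fun out n => out ++ List.replicate (spis.count n) n) []
        (by intro acc n _
            simp [PySem.Dict.getD_counter])]
  rw [PySem.List.foldl_append_eq_flatMap, List.nil_append]

-- counting sort is a permutation
lemma foo_count_flatMap (ord l : List Int) (hnd : ord.Nodup) (y : Int) :
    (ord.flatMap fun n => List.replicate (l.count n) n).count y
      = if y ∈ ord then l.count y else 0 := by
  induction ord with
  | nil => simp
  | cons h t ih =>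
    simp only [List.flatMap_cons, List.count_append, List.count_replicate,
      List.mem_cons, ih hnd.of_cons]
    by_cases hy : y = h
    · subst hy
      have : y ∉ t := (List.nodup_cons.mp hnd).1
      simp [this]
    · simp [beq_iff_eq, Ne.symm hy, hy]

lemma foo_flatMap_replicate_perm (ord l : List Int) (hnd : ord.Nodup) (hmem : ∀ x ∈ l, x ∈ ord) :
    (ord.flatMap fun n => List.replicate (l.count n) n).Perm l := by
  rw [List.perm_iff_count]
  intro y
  rw [foo_count_flatMap ord l hnd y]
  by_cases hy : y ∈ ord
  · simp [hy]
  · have : y ∉ l := fun h => hy (hmem y h)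
    simp [hy, List.count_eq_zero.mpr this]

-- flatMap of replicates over a strictly name-increasing order is name-sorted
lemma foo_flatMap_replicate_pairwise (ord : List Int) (c : Int → Nat)
    (h : ord.Pairwise (fun a b => fooName a < fooName b)) :
    (ord.flatMap fun n => List.replicate (c n) (fooName n)).Pairwise (· ≤ ·) := by
  induction ord with
  | nil => simp
  | cons hd t ih =>
    rw [List.pairwise_cons] at h
    simp only [List.flatMap_cons]
    rw [List.pairwise_append]
    refine ⟨List.pairwise_replicate.mpr (Or.inr (le_refl _)), ih h.2, ?_⟩
    intro a ha b hb
    rw [List.eq_of_mem_replicate ha]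
    obtain ⟨m, hm, hbm⟩ := List.mem_flatMap.mp hb
    rw [List.eq_of_mem_replicate hbm]
    exact le_of_lt (h.1 m hm)

lemma foo_flatMap_replicate_single {α β : Type} (c : Nat) (s : α) (g : α → List β) (n : β)
    (hg : g s = [n]) : (List.replicate c s).flatMap g = List.replicate c n := by
  induction c with
  | zero => simp
  | succ k ih => simp [List.replicate_succ, ih, hg]

lemma foo_order_nodup : fooOrderLit.Nodup := by decide

lemma foo_order_pairwise : fooOrderLit.Pairwise (fun a b => fooName a < fooName b) := by
  simp only [String.lt_iff_toList_lt]
  decide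

lemma foo_mem_order (x : Int) (h0 : 0 ≤ x) (h19 : x ≤ 19) : x ∈ fooOrderLit := by
  interval_cases x <;> decide

lemma foo_scan_single : ∀ n ∈ fooOrderLit,
    fooNames.keys.filter (fun i => fooNames.getD i "" == fooName n) = [n] := by decide

-- the sorted name list is the counting-sort concatenation
lemma foo_sorted_names (spis : List Int) (hpre : Pre_foo spis) :
    PySem.List.sorted (spis.map fooName) (fun x => x) false
      = fooOrderLit.flatMap fun n => List.replicate (spis.count n) (fooName n) := by
  apply PySem.List.sorted_id_eq_of_perm_of_pairwise
  · have h : (fooOrderLit.flatMap fun n => List.replicate (spis.count n) (fooName n))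
        = (fooOrderLit.flatMap fun n => List.replicate (spis.count n) n).map fooName := by
      rw [List.map_flatMap]
      simp [List.map_replicate]
    rw [h]
    exact (foo_flatMap_replicate_perm fooOrderLit spis foo_order_nodup
      (fun x hx => foo_mem_order x (hpre x hx).1 (hpre x hx).2)).map fooName
  · exact foo_flatMap_replicate_pairwise fooOrderLit _ foo_order_pairwise

-- ===== VERDICT (by name: the statement is the Claim_ definition above) =====
theorem foo_spec : Claim_equal_foo := by
  intro spis _ hpre
  show foo spis = foo_alt spis
  rw [fooA_eq, fooB_eq, foo_sorted_names spis hpre, List.flatMap_assoc]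
  apply List.flatMap_congr
  intro n hn
  exact foo_flatMap_replicate_single _ _ _ _ (foo_scan_single n hn)
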